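-- pv_equiv track=rewrite | github.com/JonathanFlores2503/TransLowNet_docker | transLowNet_V1_offline.py | find_largest_bbx
-- ===== SOURCE A (Python) =====
-- def find_largest_bbx(bBox_list):
--
--     if not bBox_list:
--         return None
--
--     largest_bbx = bBox_list[0]
--     largest_area = largest_bbx[2] * largest_bbx[3]  # Área inicial
--
--     for bbx in bBox_list[1:]:
--         area = bbx[2] * bbx[3]
--         if area > largest_area:
--             largest_bbx = bbx
--             largest_area = area
--
--     return largest_bbx
-- ===== SOURCE B (Python) =====
-- def find_largest_bbx(bBox_list):
--     if not bBox_list: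
--         return None
--     areas = [b[2] * b[3] for b in bBox_list]
--     return bBox_list[areas.index(max(areas))]
-- ===== Notes on version B (the rewrite author's own statement) =====
-- stated objective: simpler
-- what changed: Replaces the fused running-best scan (element and area maintained together) with a precomputed areas table followed by two separate reductions: max(areas), then first-index lookup into the original list.
import Mathlib
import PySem

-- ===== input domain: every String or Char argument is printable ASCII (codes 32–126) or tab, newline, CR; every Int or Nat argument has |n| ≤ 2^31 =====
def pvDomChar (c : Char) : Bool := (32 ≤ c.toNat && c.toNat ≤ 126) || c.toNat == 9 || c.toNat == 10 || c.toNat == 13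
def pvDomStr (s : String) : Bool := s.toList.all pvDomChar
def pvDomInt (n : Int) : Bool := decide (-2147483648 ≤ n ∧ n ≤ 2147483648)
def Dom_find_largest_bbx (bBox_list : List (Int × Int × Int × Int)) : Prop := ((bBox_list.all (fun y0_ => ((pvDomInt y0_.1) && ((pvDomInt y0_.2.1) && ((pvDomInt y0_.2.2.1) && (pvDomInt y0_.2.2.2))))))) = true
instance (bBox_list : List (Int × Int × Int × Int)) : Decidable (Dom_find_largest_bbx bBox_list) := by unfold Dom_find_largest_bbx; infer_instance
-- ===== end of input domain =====

-- B replaces A's fused running-best scan with a precomputed areas table followed by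
-- max(areas) and a first-index lookup (objective: simpler; same O(n) cost).

-- ===== PORT A =====
def find_largest_bbx (bBox_list : List (Int × Int × Int × Int)) : Option (Int × Int × Int × Int) :=
  match bBox_list with
  | [] => none
  | h :: t =>
    -- largest_bbx / largest_area carried together through the loop over bBox_list[1:]
    let r := t.foldl
      (fun st bbx =>
        if bbx.2.2.1 * bbx.2.2.2 > st.2 then (bbx, bbx.2.2.1 * bbx.2.2.2) else st)
      (h, h.2.2.1 * h.2.2.2)
    some r.1

-- ===== PORT B =====
def find_largest_bbx_alt (bBox_list : List (Int × Int × Int × Int)) : Option (Int × Int × Int × Int) :=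
  match bBox_list with
  | [] => none
  | _ :: _ =>
    let areas := bBox_list.map (fun b => b.2.2.1 * b.2.2.2)
    match PySem.List.max? areas (fun x => x) with      -- max(areas)
    | none => none
    | some m =>
      match PySem.List.index? areas m with            -- areas.index(...)
      | none => none
      | some i => PySem.List.pyGet? bBox_list (i : Int)

-- ===== PRECONDITION & SPEC =====
def Spec_find_largest_bbx (bBox_list : List (Int × Int × Int × Int)) (out : Option (Int × Int × Int × Int)) : Prop := out = find_largest_bbx_alt bBox_list
instance (bBox_list : List (Int × Int × Int × Int)) (out : Option (Int × Int × Int × Int)) : Decidable (Spec_find_largest_bbx bBox_list out) := by unfold Spec_find_largest_bbx; infer_instance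

-- ===== CLAIM (what is proved, stated in full; the proofs are below) =====
def Claim_equal_find_largest_bbx : Prop := ∀ (bBox_list : List (Int × Int × Int × Int)), Dom_find_largest_bbx bBox_list → Spec_find_largest_bbx bBox_list (find_largest_bbx bBox_list)

-- ===== LEMMAS AND PROOFS =====

-- A on h::x::t is A on the winner of the first comparison consed onto t.
theorem pvA_cons_cons (h x : Int × Int × Int × Int) (t : List (Int × Int × Int × Int)) :
    find_largest_bbx (h :: x :: t) =
      if x.2.2.1 * x.2.2.2 > h.2.2.1 * h.2.2.2
      then find_largest_bbx (x :: t) else find_largest_bbx (h :: t) := by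
  simp only [find_largest_bbx, List.foldl_cons]
  split_ifs with hc <;> rfl

-- B's result on h::t as a function of the running max of the areas.
theorem pvAlt_cons (h : Int × Int × Int × Int) (t : List (Int × Int × Int × Int)) :
    find_largest_bbx_alt (h :: t) =
      match PySem.List.index? ((h :: t).map (fun b => b.2.2.1 * b.2.2.2))
          ((t.map (fun b => b.2.2.1 * b.2.2.2)).foldl max (h.2.2.1 * h.2.2.2)) with
      | none => none
      | some i => PySem.List.pyGet? (h :: t) (i : Int) := by
  simp only [find_largest_bbx_alt, List.map_cons, PySem.List.max?_id_cons]

-- B satisfies the same first-comparison recursion as A.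
theorem pvAlt_cons_cons (h x : Int × Int × Int × Int) (t : List (Int × Int × Int × Int)) :
    find_largest_bbx_alt (h :: x :: t) =
      if x.2.2.1 * x.2.2.2 > h.2.2.1 * h.2.2.2
      then find_largest_bbx_alt (x :: t) else find_largest_bbx_alt (h :: t) := by
  rw [pvAlt_cons h (x :: t), pvAlt_cons x t, pvAlt_cons h t]
  simp only [List.map_cons, List.foldl_cons]
  generalize x.2.2.1 * x.2.2.2 = ax
  generalize h.2.2.1 * h.2.2.2 = ah
  generalize List.map (fun b => b.2.2.1 * b.2.2.2) t = as
  split_ifs with hc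
  · -- ax > ah : first element h never matters
    rw [max_eq_right (le_of_lt hc)]
    have hxm : ax ≤ as.foldl max ax := (PySem.List.le_foldl_max as ax).1
    have hne : ah ≠ as.foldl max ax := by omega
    have hmem : as.foldl max ax ∈ ax :: as := by
      rcases PySem.List.foldl_max_mem as ax with h1 | h1
      · rw [h1]; exact List.mem_cons_self
      · exact List.mem_cons_of_mem _ h1
    obtain ⟨j, hj⟩ := Option.isSome_iff_exists.mp
      ((PySem.List.index?_isSome_iff _ _).mpr hmem)
    rw [PySem.List.index?_cons_of_ne _ hne, hj]
    simp only [Option.map_some]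
    rw [PySem.List.pyGet?_natCast, PySem.List.pyGet?_natCast]
    simp
  · -- ax ≤ ah : the winner of the first comparison is h
    rw [not_lt] at hc
    rw [max_eq_left hc]
    have hham : ah ≤ as.foldl max ah := (PySem.List.le_foldl_max as ah).1
    by_cases hmh : as.foldl max ah = ah
    · -- the head itself is maximal: index 0 on both sides
      rw [hmh, PySem.List.index?_cons_self, PySem.List.index?_cons_self]
      simp
    · -- maximum comes from the tail; indices shift by one
      have hlt : ah < as.foldl max ah := lt_of_le_of_ne hham (fun e => hmh e.symm)
      have hne1 : ah ≠ as.foldl max ah := by omega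
      have hne2 : ax ≠ as.foldl max ah := by omega
      have hmem : as.foldl max ah ∈ as := by
        rcases PySem.List.foldl_max_mem as ah with h1 | h1
        · exact absurd h1 hmh
        · exact h1
      obtain ⟨j, hj⟩ := Option.isSome_iff_exists.mp
        ((PySem.List.index?_isSome_iff _ _).mpr hmem)
      rw [PySem.List.index?_cons_of_ne _ hne1, PySem.List.index?_cons_of_ne _ hne2, hj,
        PySem.List.index?_cons_of_ne _ hne1, hj]
      simp only [Option.map_some]
      rw [PySem.List.pyGet?_natCast, PySem.List.pyGet?_natCast]
      simp

theorem pvA_eq_alt (l : List (Int × Int × Int × Int)) :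
    find_largest_bbx l = find_largest_bbx_alt l := by
  cases l with
  | nil => rfl
  | cons h t =>
    induction t generalizing h with
    | nil =>
      rw [pvAlt_cons]
      simp [find_largest_bbx]
    | cons x t ih =>
      rw [pvA_cons_cons, pvAlt_cons_cons]
      split_ifs with hc
      · exact ih x
      · exact ih h

-- ===== VERDICT (by name: the statement is the Claim_ definition above) =====
theorem find_largest_bbx_spec : Claim_equal_find_largest_bbx := by
  intro l _
  unfold Spec_find_largest_bbx
  exact pvA_eq_alt l
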